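-- pv_equiv track=rewrite | github.com/rorieArmstrong/PythonRevision | Task3.py | not_primes
-- ===== SOURCE A (Python) =====
-- def isPrime(num):
--     for i in range(2, num//2):
--         if (num % i) == 0:
--             return False
--     return True
--
-- def not_primes(a, b):
--     list = []
--     primes = [2, 3, 5, 7]
--     for i in range(a,b):
--         arr = [int(d) for d in str(i)]
--         if all(x in primes for x in arr):
--             if not isPrime(i):
--                 list.append(i)
--     return list
-- ===== SOURCE B (Python) =====
-- def _has_small_factor(n):
--     d = 2
--     while d * d <= n:
--         if n % d == 0:
--             return True
--         d += 1
--     return False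
--
-- def not_primes(a, b):
--     res = []
--     level = [2, 3, 5, 7]
--     for _ in range(len(str(b)) if b > 0 else 0):
--         for n in level:
--             if a <= n < b and _has_small_factor(n):
--                 res.append(n)
--         level = [10 * n + d for n in level for d in (2, 3, 5, 7)]
--     return res
-- ===== Notes on version B (the rewrite author's own statement) =====
-- stated objective: alternative
-- what changed: Instead of scanning every integer in [a,b) and trial-dividing up to n//2, B generates only the numbers whose digits are all in {2,3,5,7}, level by digit count, and tests each candidate by trial division up to sqrt(n); it does far less work on wide ranges but more than A on narrow ranges with a large b, so no overall speed is claimed.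
import Mathlib
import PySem

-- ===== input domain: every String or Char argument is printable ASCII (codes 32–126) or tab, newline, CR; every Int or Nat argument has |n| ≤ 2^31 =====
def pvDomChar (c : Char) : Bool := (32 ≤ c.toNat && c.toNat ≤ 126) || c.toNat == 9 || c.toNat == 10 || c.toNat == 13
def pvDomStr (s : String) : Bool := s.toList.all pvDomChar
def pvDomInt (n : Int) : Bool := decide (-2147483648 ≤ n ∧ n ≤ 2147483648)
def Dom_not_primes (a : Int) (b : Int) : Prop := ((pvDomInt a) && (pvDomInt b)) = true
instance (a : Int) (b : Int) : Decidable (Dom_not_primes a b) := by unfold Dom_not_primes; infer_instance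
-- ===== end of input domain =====

-- B replaces A's scan of every integer in [a,b) (with trial division up to n//2) by generating only
-- the numbers whose digits are all in {2,3,5,7}, level by digit count, and testing each by trial
-- division while d*d <= n (a different algorithm; no overall speed is claimed).

-- ===== PORT A =====
def isPrimeA (num : Int) : Bool :=
  (PySem.List.pyRange 2 (PySem.Int.floordiv num 2) 1).all (fun i => !(PySem.Int.mod num i == 0))

-- int(d) over str(i): for negative i the '-' sign makes int(d) raise ValueError (ofChars? = none);
-- those inputs are excluded by Pre_not_primes, so the .getD 0 default is never Python's value inside Pre_.
def not_primes (a : Int) (b : Int) : List Int :=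
  (PySem.List.pyRange a b 1).foldl (fun lst i =>
    let arr := (PySem.Int.toStr i).toList.map (fun d => (PySem.Int.ofChars? [d]).getD 0)
    if arr.all (fun x => [(2:Int),3,5,7].contains x) then
      (if !(isPrimeA i) then lst ++ [i] else lst)
    else lst) []

-- ===== PORT B =====
-- 'd = 2; while d*d <= n: …': the fuel n.toNat only makes the while loop structural — it cannot run
-- out before d*d > n (at fuel 0, d = n.toNat + 2 so d*d > n); same iterations as the Python loop.
def hsfAux : Nat → Int → Int → Bool
  | 0, _, _ => false
  | k+1, n, d => if d*d ≤ n then (if PySem.Int.mod n d == 0 then true else hsfAux k n (d+1)) else false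

def hasSmallFactor (n : Int) : Bool := hsfAux n.toNat n 2

def not_primes_alt (a : Int) (b : Int) : List Int :=
  let nd : Int := if 0 < b then PySem.Str.len (PySem.Int.toStr b) else 0
  ((PySem.List.pyRange 0 nd 1).foldl (fun (st : List Int × List Int) _ =>
      (st.2.foldl (fun r n => if a ≤ n ∧ n < b ∧ hasSmallFactor n then r ++ [n] else r) st.1,
       st.2.flatMap (fun n => [(2:Int),3,5,7].map (fun d => 10*n + d)))) ([], [2,3,5,7])).1

-- ===== PRECONDITION & SPEC =====
-- Pre_ excludes exactly the inputs with a < 0 and a < b — ranges that contain a negative i, on which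
-- A's int(d) raises ValueError on the '-' sign of str(i) (A returns on every input Pre_ admits).
def Pre_not_primes (a : Int) (b : Int) : Prop := 0 ≤ a ∨ b ≤ a
instance (a : Int) (b : Int) : Decidable (Pre_not_primes a b) := by unfold Pre_not_primes; infer_instance
def pvWitness_not_primes : Int × Int := (0, 60)

def Spec_not_primes (a : Int) (b : Int) (out : List Int) : Prop := out = not_primes_alt a b
instance (a : Int) (b : Int) (out : List Int) : Decidable (Spec_not_primes a b out) := by unfold Spec_not_primes; infer_instance

-- ===== CLAIM (what is proved, stated in full; the proofs are below) =====
def Claim_equal_not_primes : Prop := ∀ (a : Int) (b : Int), Dom_not_primes a b → Pre_not_primes a b → Spec_not_primes a b (not_primes a b)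

-- ===== LEMMAS AND PROOFS =====

-- A's digit condition 'all(int(d) in primes for d in str(i))', read on a natural number.
def dOK (m : Nat) : Bool :=
  ((Nat.toDigits 10 m).map (fun d => (PySem.Int.ofChars? [d]).getD 0)).all
    (fun x => [(2:Int),3,5,7].contains x)

-- the successive candidate levels B generates (lvl k = the (k+1)-digit candidates), and their union
def lvl : Nat → List Int
  | 0 => [2,3,5,7]
  | k+1 => (lvl k).flatMap (fun n => [(2:Int),3,5,7].map (fun d => 10*n + d))

def cands : Nat → List Int
  | 0 => []
  | k+1 => cands k ++ lvl k

theorem tdc_acc (f : Nat) : ∀ (n : Nat) (ds : List Char),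
    Nat.toDigitsCore 10 f n ds = Nat.toDigitsCore 10 f n [] ++ ds := by
  induction f with
  | zero => intro n ds; simp [Nat.toDigitsCore]
  | succ f ih =>
    intro n ds
    simp only [Nat.toDigitsCore]
    by_cases h : n / 10 = 0
    · simp [h]
    · simp [h]; rw [ih (n/10) [Nat.digitChar (n%10)], ih (n/10) (Nat.digitChar (n%10) :: ds)]
      simp

theorem tdc_fuel : ∀ (f f' n : Nat) (ds : List Char), 0 < f → 0 < f' → n < 10 ^ f → n < 10 ^ f' →
    Nat.toDigitsCore 10 f n ds = Nat.toDigitsCore 10 f' n ds := by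
  intro f
  induction f with
  | zero => omega
  | succ f ih =>
    intro f' n ds _ hf' hn hn'
    match f', hf' with
    | f'+1, _ =>
      simp only [Nat.toDigitsCore]
      by_cases h : n / 10 = 0
      · simp [h]
      · simp only [h, if_false]
        have h10 : 10 ≤ n := by omega
        have hf1 : 0 < f := by
          by_contra hc
          have : f = 0 := by omega
          subst this
          simp at hn; omega
        have hf'1 : 0 < f' := by
          by_contra hc
          have : f' = 0 := by omega
          subst this
          simp at hn'; omega
        have d1 : n / 10 < 10 ^ f := by
          rw [Nat.div_lt_iff_lt_mul (by norm_num : 0 < 10)]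
          calc n < 10 ^ (f+1) := hn
               _ = 10 ^ f * 10 := by ring
        have d2 : n / 10 < 10 ^ f' := by
          rw [Nat.div_lt_iff_lt_mul (by norm_num : 0 < 10)]
          calc n < 10 ^ (f'+1) := hn'
               _ = 10 ^ f' * 10 := by ring
        exact ih f' (n/10) _ hf1 hf'1 d1 d2

theorem td_small (m : Nat) (h : m < 10) : Nat.toDigits 10 m = [Nat.digitChar m] := by
  unfold Nat.toDigits
  simp only [Nat.toDigitsCore]
  have : m / 10 = 0 := by omega
  simp [this, Nat.mod_eq_of_lt h]

theorem td_step (m : Nat) (h : 10 ≤ m) :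
    Nat.toDigits 10 m = Nat.toDigits 10 (m / 10) ++ [Nat.digitChar (m % 10)] := by
  unfold Nat.toDigits
  have h1 : m < 10 ^ (m + 1) := by
    calc m < 2 ^ m := Nat.lt_two_pow_self
      _ ≤ 10 ^ m := Nat.pow_le_pow_left (by norm_num) m
      _ ≤ 10 ^ (m+1) := Nat.pow_le_pow_right (by norm_num) (by omega)
  have hne : ¬ m / 10 = 0 := by omega
  conv_lhs => simp only [Nat.toDigitsCore]
  simp only [hne, if_false]
  have hd1 : m / 10 < 10 ^ m := by
    have : m / 10 < m := Nat.div_lt_self (by omega) (by norm_num)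
    calc m / 10 < m := this
      _ < 2 ^ m := Nat.lt_two_pow_self
      _ ≤ 10 ^ m := Nat.pow_le_pow_left (by norm_num) m
  have hd2 : m / 10 < 10 ^ (m / 10 + 1) := by
    calc m / 10 < 2 ^ (m/10) := Nat.lt_two_pow_self
      _ ≤ 10 ^ (m/10) := Nat.pow_le_pow_left (by norm_num) _
      _ ≤ 10 ^ (m/10+1) := Nat.pow_le_pow_right (by norm_num) (by omega)
  have hm0 : 0 < m := by omega
  rw [tdc_fuel m (m/10+1) (m/10) _ (by omega) (by omega) hd1 hd2]
  rw [tdc_acc]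

theorem td_len_pos (m : Nat) : 1 ≤ (Nat.toDigits 10 m).length := by
  by_cases h : m < 10
  · rw [td_small m h]; simp
  · rw [td_step m (by omega)]; simp

theorem td_lt (m : Nat) : m < 10 ^ (Nat.toDigits 10 m).length := by
  induction m using Nat.strong_induction_on with
  | _ m ih =>
    by_cases h : m < 10
    · rw [td_small m h]; simpa using h
    · rw [td_step m (by omega)]
      have := ih (m/10) (Nat.div_lt_self (by omega) (by norm_num))
      simp only [List.length_append, List.length_cons, List.length_nil]
      have : m < 10 ^ ((Nat.toDigits 10 (m/10)).length + 1) := by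
        rw [pow_succ]
        have h2 : m < (m/10 + 1) * 10 := by omega
        calc m < (m/10 + 1) * 10 := h2
          _ ≤ 10 ^ (Nat.toDigits 10 (m/10)).length * 10 := by
              exact Nat.mul_le_mul_right 10 (by omega)
      simpa using this

theorem td_ge (m : Nat) (h : 1 ≤ m) : 10 ^ ((Nat.toDigits 10 m).length - 1) ≤ m := by
  induction m using Nat.strong_induction_on with
  | _ m ih =>
    by_cases hm : m < 10
    · rw [td_small m hm]; simpa using h
    · rw [td_step m (by omega)]
      have hq : 1 ≤ m / 10 := by omega
      have := ih (m/10) (Nat.div_lt_self (by omega) (by norm_num)) hq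
      simp only [List.length_append, List.length_cons, List.length_nil]
      have hl := td_len_pos (m/10)
      have : 10 ^ ((Nat.toDigits 10 (m/10)).length + 1 - 1) ≤ m := by
        rw [Nat.add_sub_cancel]
        calc 10 ^ (Nat.toDigits 10 (m/10)).length
            = 10 ^ ((Nat.toDigits 10 (m/10)).length - 1 + 1) := by congr 1; omega
          _ = 10 ^ ((Nat.toDigits 10 (m/10)).length - 1) * 10 := by rw [pow_succ]
          _ ≤ (m/10) * 10 := Nat.mul_le_mul_right 10 this
          _ ≤ m := by omega
      simpa using this

theorem toChars_nonneg (i : Int) (h : 0 ≤ i) : PySem.Int.toChars i = Nat.toDigits 10 i.toNat := by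
  unfold PySem.Int.toChars
  rw [if_neg (by omega)]

theorem chk (r : Nat) (h : r < 10) :
    ([(2:Int),3,5,7].contains ((PySem.Int.ofChars? [Nat.digitChar r]).getD 0))
      = decide (r = 2 ∨ r = 3 ∨ r = 5 ∨ r = 7) := by
  interval_cases r <;> decide

theorem dOK_small (m : Nat) (h : m < 10) :
    dOK m = decide (m = 2 ∨ m = 3 ∨ m = 5 ∨ m = 7) := by
  unfold dOK
  rw [td_small m h]
  simp only [List.map_cons, List.map_nil, List.all_cons, List.all_nil, Bool.and_true]
  rw [chk m h]

theorem dOK_step (m : Nat) (h : 10 ≤ m) :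
    dOK m = (dOK (m / 10) && decide (m % 10 = 2 ∨ m % 10 = 3 ∨ m % 10 = 5 ∨ m % 10 = 7)) := by
  unfold dOK
  rw [td_step m h]
  simp only [List.map_append, List.all_append, List.map_cons, List.map_nil, List.all_cons,
    List.all_nil, Bool.and_true]
  rw [chk (m % 10) (by omega)]

theorem dOK_zero : dOK 0 = false := by decide

theorem mem_lvl (k : Nat) : ∀ (x : Int),
    x ∈ lvl k ↔ (0 ≤ x ∧ dOK x.toNat = true ∧ (Nat.toDigits 10 x.toNat).length = k + 1) := by
  induction k with
  | zero =>
    intro x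
    constructor
    · intro hx
      fin_cases hx <;> refine ⟨by norm_num, by decide, by decide⟩
    · rintro ⟨h0, hd, hl⟩
      have hm : x.toNat < 10 := by
        by_contra hc
        rw [td_step x.toNat (by omega)] at hl
        have := td_len_pos (x.toNat / 10)
        simp only [List.length_append, List.length_cons, List.length_nil] at hl
        omega
      have hx : x = (x.toNat : Int) := by omega
      rw [dOK_small _ hm] at hd
      simp only [decide_eq_true_eq] at hd
      rw [hx]
      rcases hd with h|h|h|h <;> rw [h] <;> simp [lvl]
  | succ k ih =>
    intro x
    simp only [lvl, List.mem_flatMap, List.mem_map]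
    constructor
    · rintro ⟨p, hp, y, hy, rfl⟩
      obtain ⟨hp0, hpd, hpl⟩ := (ih p).mp hp
      have hp1 : 1 ≤ p.toNat := by
        rcases Nat.eq_zero_or_pos p.toNat with h|h
        · rw [h, dOK_zero] at hpd; exact absurd hpd (by simp)
        · exact h
      have hyv : y = 2 ∨ y = 3 ∨ y = 5 ∨ y = 7 := by fin_cases hy <;> simp
      have h0 : (0:Int) ≤ 10*p + y := by omega
      have hn : (10*p + y).toNat = 10 * p.toNat + y.toNat := by omega
      have h10 : 10 ≤ (10*p+y).toNat := by omega
      have hdiv : (10*p+y).toNat / 10 = p.toNat := by omega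
      have hmod : (10*p+y).toNat % 10 = y.toNat := by omega
      refine ⟨h0, ?_, ?_⟩
      · rw [dOK_step _ h10, hdiv, hmod, hpd]
        simp only [Bool.true_and, decide_eq_true_eq]
        rcases hyv with h|h|h|h <;> subst h <;> simp
      · rw [td_step _ h10, hdiv]
        simp [hpl]
    · rintro ⟨h0, hd, hl⟩
      have hm10 : 10 ≤ x.toNat := by
        by_contra hc
        rw [td_small _ (by omega)] at hl
        simp at hl
      rw [dOK_step _ hm10] at hd
      rw [td_step _ hm10] at hl
      simp only [Bool.and_eq_true, decide_eq_true_eq] at hd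
      simp only [List.length_append, List.length_cons, List.length_nil] at hl
      refine ⟨(x.toNat / 10 : Nat), (ih _).mpr ⟨by positivity, by rw [Int.toNat_natCast]; exact hd.1, by rw [Int.toNat_natCast]; omega⟩,
        ((x.toNat % 10 : Nat) : Int), ?_, ?_⟩
      · rcases hd.2 with h|h|h|h <;> rw [h] <;> simp
      · omega

theorem lvl_bounds (k : Nat) (x : Int) (hx : x ∈ lvl k) :
    (10:Int) ^ k ≤ x ∧ x < 10 ^ (k+1) := by
  obtain ⟨h0, hd, hl⟩ := (mem_lvl k x).mp hx
  have h1 : 1 ≤ x.toNat := by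
    rcases Nat.eq_zero_or_pos x.toNat with h|h
    · rw [h, dOK_zero] at hd; exact absurd hd (by simp)
    · exact h
  have hge := td_ge x.toNat h1
  have hlt := td_lt x.toNat
  rw [hl] at hge hlt
  simp only [Nat.add_sub_cancel] at hge
  constructor
  · have : (10:Int)^k = ((10^k : Nat) : Int) := by push_cast; ring
    omega
  · have : (10:Int)^(k+1) = ((10^(k+1) : Nat) : Int) := by push_cast; ring
    omega

theorem lvl_pairwise (k : Nat) : (lvl k).Pairwise (· < ·) := by
  induction k with
  | zero => simp only [lvl]; norm_num
  | succ k ih =>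
    simp only [lvl]
    rw [List.pairwise_flatMap]
    constructor
    · intro p _
      simp only [List.map_cons, List.map_nil]
      refine List.Pairwise.cons ?_ (List.Pairwise.cons ?_ (List.Pairwise.cons ?_ (List.Pairwise.cons ?_ List.Pairwise.nil))) <;>
        (intro y hy; fin_cases hy <;> omega)
    · refine ih.imp ?_
      intro p q hpq x hx y hy
      simp only [List.mem_map] at hx hy
      obtain ⟨dx, hdx, rfl⟩ := hx
      obtain ⟨dy, hdy, rfl⟩ := hy
      have h2 : dx ≤ 7 := by fin_cases hdx <;> norm_num
      have h3 : 2 ≤ dy := by fin_cases hdy <;> norm_num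
      omega

theorem mem_cands (K : Nat) : ∀ (x : Int),
    x ∈ cands K ↔ (0 ≤ x ∧ dOK x.toNat = true ∧ (Nat.toDigits 10 x.toNat).length ≤ K) := by
  induction K with
  | zero =>
    intro x
    simp only [cands, List.not_mem_nil, false_iff]
    rintro ⟨_, _, hl⟩
    have := td_len_pos x.toNat
    omega
  | succ K ih =>
    intro x
    simp only [cands, List.mem_append, ih, mem_lvl]
    constructor
    · rintro (⟨h0,hd,hl⟩|⟨h0,hd,hl⟩) <;> exact ⟨h0, hd, by omega⟩
    · rintro ⟨h0, hd, hl⟩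
      by_cases h : (Nat.toDigits 10 x.toNat).length ≤ K
      · exact Or.inl ⟨h0, hd, h⟩
      · exact Or.inr ⟨h0, hd, by omega⟩

theorem cands_pairwise (K : Nat) : (cands K).Pairwise (· < ·) := by
  induction K with
  | zero => simp [cands]
  | succ K ih =>
    simp only [cands]
    rw [List.pairwise_append]
    refine ⟨ih, lvl_pairwise K, ?_⟩
    intro x hx y hy
    obtain ⟨k, hk⟩ : ∃ k, k < K ∧ x ∈ lvl k := by
      clear hy ih
      induction K with
      | zero => simp [cands] at hx
      | succ K ihK =>
        simp only [cands, List.mem_append] at hx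
        rcases hx with h|h
        · obtain ⟨k, hk1, hk2⟩ := ihK h
          exact ⟨k, by omega, hk2⟩
        · exact ⟨K, by omega, h⟩
    have hb1 := (lvl_bounds k x hk.2).2
    have hb2 := (lvl_bounds K y hy).1
    have : (10:Int)^(k+1) ≤ 10^K := pow_le_pow_right₀ (by norm_num) (by omega)
    omega

theorem a_filter (a b : Int) :
    not_primes a b = (PySem.List.pyRange a b 1).filter
      (fun i => (((PySem.Int.toStr i).toList.map (fun d => (PySem.Int.ofChars? [d]).getD 0)).all
          (fun x => [(2:Int),3,5,7].contains x)) && !(isPrimeA i)) := by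
  unfold not_primes
  have : ∀ (lst : List Int) (i : Int),
      (let arr := (PySem.Int.toStr i).toList.map (fun d => (PySem.Int.ofChars? [d]).getD 0)
       if arr.all (fun x => [(2:Int),3,5,7].contains x) then
         (if !(isPrimeA i) then lst ++ [i] else lst)
       else lst)
      = if ((((PySem.Int.toStr i).toList.map (fun d => (PySem.Int.ofChars? [d]).getD 0)).all
          (fun x => [(2:Int),3,5,7].contains x)) && !(isPrimeA i)) = true then lst ++ [id i] else lst := by
    intro lst i
    cases h1 : (((PySem.Int.toStr i).toList.map (fun d => (PySem.Int.ofChars? [d]).getD 0)).all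
        (fun x => [(2:Int),3,5,7].contains x)) <;> cases h2 : isPrimeA i <;> (simp only [h1]; rfl)
  calc (PySem.List.pyRange a b 1).foldl _ [] 
      = (PySem.List.pyRange a b 1).foldl (fun lst i =>
          if ((((PySem.Int.toStr i).toList.map (fun d => (PySem.Int.ofChars? [d]).getD 0)).all
            (fun x => [(2:Int),3,5,7].contains x)) && !(isPrimeA i)) = true then lst ++ [id i] else lst) [] := by
        exact List.foldl_ext _ _ _ (fun acc x _ => this acc x)
    _ = _ := by
        rw [PySem.List.foldl_append_if]
        simp

theorem str_len_toChars (b : Int) : PySem.Str.len (PySem.Int.toStr b) = ((PySem.Int.toChars b).length : Int) := by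
  simp [pysem, PySem.Int.toList_toStr]

theorem b_loop (a b : Int) (j : Nat) :
    (PySem.List.pyRange 0 (j:Int) 1).foldl (fun (st : List Int × List Int) _ =>
      (st.2.foldl (fun r n => if a ≤ n ∧ n < b ∧ hasSmallFactor n then r ++ [n] else r) st.1,
       st.2.flatMap (fun n => [(2:Int),3,5,7].map (fun d => 10*n + d)))) ([], [2,3,5,7])
    = ((cands j).filter (fun n => decide (a ≤ n ∧ n < b ∧ hasSmallFactor n = true)), lvl j) := by
  induction j with
  | zero =>
    rw [PySem.List.pyRange_one_eq_nil (by norm_num)]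
    simp [cands, lvl]
  | succ j ih =>
    rw [show ((j+1:Nat) : Int) = (j:Int) + 1 by push_cast; ring,
      PySem.List.pyRange_one_succ_right (by positivity), List.foldl_append, ih]
    simp only [List.foldl_cons, List.foldl_nil, Prod.mk.injEq]
    refine ⟨?_, ?_⟩
    · have he : ∀ (r : List Int) (n : Int),
          (if a ≤ n ∧ n < b ∧ hasSmallFactor n then r ++ [n] else r)
          = if (fun n => decide (a ≤ n ∧ n < b ∧ hasSmallFactor n = true)) n = true then r ++ [id n] else r := by
        intro r n
        simp only [decide_eq_true_eq, id]
      rw [List.foldl_ext _ _ _ (fun r n _ => he r n), PySem.List.foldl_append_if]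
      simp only [List.map_id]
      show _ = List.filter _ (cands j ++ lvl j)
      rw [List.filter_append]
    · rfl

theorem b_filter (a b : Int) :
    not_primes_alt a b = (cands (if 0 < b then (PySem.Int.toChars b).length else 0)).filter
      (fun n => decide (a ≤ n ∧ n < b ∧ hasSmallFactor n = true)) := by
  unfold not_primes_alt
  by_cases hb : 0 < b
  · simp only [hb, if_pos]
    rw [str_len_toChars b, b_loop a b ((PySem.Int.toChars b).length)]
  · simp only [hb, if_false]
    have h0 := b_loop a b 0
    simp only [Nat.cast_zero] at h0
    rw [h0]

theorem hsfAux_iff (k : Nat) : ∀ (n d : Int), 2 ≤ d → (n + 2 - d).toNat ≤ k →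
    (hsfAux k n d = true ↔ ∃ e : Int, d ≤ e ∧ e * e ≤ n ∧ e ∣ n) := by
  induction k with
  | zero =>
    intro n d hd hk
    simp only [hsfAux, Bool.false_eq_true, false_iff]
    rintro ⟨e, he1, he2, _⟩
    have hd2 : n + 2 ≤ d := by omega
    have hdd : d * d ≤ e * e := by nlinarith
    nlinarith
  | succ k ih =>
    intro n d hd hk
    simp only [hsfAux]
    by_cases h1 : d * d ≤ n
    · rw [if_pos h1]
      by_cases h2 : PySem.Int.mod n d = 0
      · simp only [h2]
        simp only [beq_self_eq_true, if_true, true_iff]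
        exact ⟨d, le_refl d, h1, (PySem.Int.mod_eq_zero_iff_dvd n d).mp h2⟩
      · have hne : (PySem.Int.mod n d == 0) = false := by simp [h2]
        rw [hne]
        simp only [Bool.false_eq_true, if_false]
        rw [ih n (d+1) (by omega) (by omega)]
        constructor
        · rintro ⟨e, he1, he2, he3⟩; exact ⟨e, by omega, he2, he3⟩
        · rintro ⟨e, he1, he2, he3⟩
          refine ⟨e, ?_, he2, he3⟩
          rcases eq_or_lt_of_le he1 with h|h
          · exfalso; apply h2; rw [← h] at he3; exact (PySem.Int.mod_eq_zero_iff_dvd n d).mpr he3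
          · omega
    · rw [if_neg h1]
      simp only [Bool.false_eq_true, false_iff]
      rintro ⟨e, he1, he2, _⟩
      have : d * d ≤ e * e := by nlinarith
      nlinarith

theorem hasSmallFactor_iff (n : Int) :
    hasSmallFactor n = true ↔ ∃ e : Int, 2 ≤ e ∧ e * e ≤ n ∧ e ∣ n := by
  exact hsfAux_iff n.toNat n 2 (by omega) (by omega)

theorem isPrimeA_iff (n : Int) :
    isPrimeA n = false ↔ ∃ e : Int, 2 ≤ e ∧ e < PySem.Int.floordiv n 2 ∧ e ∣ n := by
  unfold isPrimeA
  rw [← Bool.not_eq_true, List.all_eq_true]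
  simp only [PySem.List.mem_pyRange_one]
  constructor
  · intro h
    push Not at h
    obtain ⟨e, he, hm⟩ := h
    refine ⟨e, he.1, he.2, ?_⟩
    rw [← PySem.Int.mod_eq_zero_iff_dvd]
    simpa using hm
  · rintro ⟨e, he1, he2, he3⟩ h
    have := h e ⟨he1, he2⟩
    rw [← PySem.Int.mod_eq_zero_iff_dvd n e] at he3
    simp [he3] at this

theorem prime_bridge (n : Int) (h : 6 ≤ n) :
    (¬ isPrimeA n = true) ↔ hasSmallFactor n = true := by
  rw [Bool.not_eq_true, isPrimeA_iff, hasSmallFactor_iff]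
  have hfd : PySem.Int.floordiv n 2 = n / 2 := PySem.Int.floordiv_eq_ediv_of_pos (by omega)
  rw [hfd]
  constructor
  · rintro ⟨e, he1, he2, he3⟩
    by_cases hsq : e * e ≤ n
    · exact ⟨e, he1, hsq, he3⟩
    · obtain ⟨q, hq⟩ := he3
      push Not at hsq
      have he0 : 0 < e := by omega
      have h2e : 2*e + 2 ≤ n := by omega
      have hq0 : 0 < q := by nlinarith
      have hqe : q < e := by nlinarith
      have hq2 : 2 ≤ q := by nlinarith [mul_nonneg (le_of_lt he0) (le_of_lt hq0)]
      exact ⟨q, hq2, by nlinarith, ⟨e, by rw [hq]; ring⟩⟩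
    
  · rintro ⟨e, he1, he2, he3⟩
    refine ⟨e, he1, ?_, he3⟩
    -- e*e ≤ n, 2 ≤ e → e < n/2 given n ≥ 6
    have h2 : 2*e ≤ e*e := by nlinarith
    by_cases he2' : e = 2
    · subst he2'; omega
    · have : 3 ≤ e := by omega
      have : 2*e + 2 ≤ e*e := by nlinarith
      omega

theorem digit_small (n : Int) (h0 : 0 ≤ n) (h9 : n < 10) (hd : dOK n.toNat = true) :
    n = 2 ∨ n = 3 ∨ n = 5 ∨ n = 7 := by
  rw [dOK_small n.toNat (by omega)] at hd
  simp only [decide_eq_true_eq] at hd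
  omega

theorem prime_digit_single (n : Int) (h : n = 2 ∨ n = 3 ∨ n = 5 ∨ n = 7) :
    isPrimeA n = true ∧ hasSmallFactor n = false := by
  rcases h with rfl|rfl|rfl|rfl <;> exact ⟨by decide, by decide⟩

-- on any digit-{2,3,5,7} number, A's trial division to n//2 and B's to sqrt(n) agree
theorem pred_iff (n : Int) (h0 : 0 ≤ n) (hd : dOK n.toNat = true) :
    ((!(isPrimeA n)) = true) = (hasSmallFactor n = true) := by
  by_cases h : n < 10
  · obtain ⟨hp, hf⟩ := prime_digit_single n (digit_small n h0 h hd)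
    rw [hp, hf]
    simp
  · have hb := prime_bridge n (by omega)
    simp only [Bool.not_eq_eq_eq_not, Bool.not_true, eq_iff_iff]
    rw [← hb, Bool.not_eq_true]

theorem td_len_le (m K : Nat) (h1 : 1 ≤ m) (hm : m < 10 ^ K) : (Nat.toDigits 10 m).length ≤ K := by
  by_contra hc
  have hge := td_ge m h1
  have : 10 ^ K ≤ 10 ^ ((Nat.toDigits 10 m).length - 1) :=
    Nat.pow_le_pow_right (by norm_num) (by omega)
  omega

theorem not_primes_spec : Claim_equal_not_primes := by
  intro a b _ hpre
  unfold Spec_not_primes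
  rw [a_filter, b_filter]
  by_cases hba : b ≤ a
  · rw [PySem.List.pyRange_one_eq_nil hba, List.filter_nil]
    symm
    rw [List.filter_eq_nil_iff]
    intro n _
    simp only [decide_eq_true_eq]
    rintro ⟨h1, h2, _⟩
    omega
  · have ha : 0 ≤ a := by rcases hpre with h|h; exact h; omega
    have hb : 0 < b := by omega
    set K := if 0 < b then (PySem.Int.toChars b).length else 0 with hK
    have hKv : K = (Nat.toDigits 10 b.toNat).length := by
      rw [hK, if_pos hb, toChars_nonneg b (by omega)]
    -- both sides are strictly increasing; show they are permutations of each other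
    have hpl : (List.filter (fun i =>
        (((PySem.Int.toStr i).toList.map (fun d => (PySem.Int.ofChars? [d]).getD 0)).all
          (fun x => [(2:Int),3,5,7].contains x)) && !(isPrimeA i)) (PySem.List.pyRange a b 1)).Pairwise (· < ·) :=
      (PySem.List.pairwise_lt_pyRange_one a b).filter _
    have hpr : (List.filter (fun n => decide (a ≤ n ∧ n < b ∧ hasSmallFactor n = true)) (cands K)).Pairwise (· < ·) :=
      (cands_pairwise K).filter _
    have hmem : ∀ (n : Int),
        n ∈ List.filter (fun i =>
          (((PySem.Int.toStr i).toList.map (fun d => (PySem.Int.ofChars? [d]).getD 0)).all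
            (fun x => [(2:Int),3,5,7].contains x)) && !(isPrimeA i)) (PySem.List.pyRange a b 1)
        ↔ n ∈ List.filter (fun n => decide (a ≤ n ∧ n < b ∧ hasSmallFactor n = true)) (cands K) := by
      intro n
      simp only [List.mem_filter, PySem.List.mem_pyRange_one, Bool.and_eq_true, decide_eq_true_eq,
        mem_cands]
      constructor
      · rintro ⟨⟨han, hnb⟩, hdig, hpr⟩
        have h0 : 0 ≤ n := by omega
        have hdn : dOK n.toNat = true := by
          rw [PySem.Int.toList_toStr, toChars_nonneg n h0] at hdig
          exact hdig
        have h2n : 2 ≤ n := by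
          rcases lt_or_ge n 10 with h|h
          · have := digit_small n h0 h hdn; omega
          · omega
        have hlen : (Nat.toDigits 10 n.toNat).length ≤ K := by
          apply td_len_le n.toNat K (by omega)
          have hblt := td_lt b.toNat
          rw [← hKv] at hblt
          omega
        refine ⟨⟨h0, hdn, hlen⟩, han, hnb, ?_⟩
        rw [← pred_iff n h0 hdn]
        exact hpr
      · rintro ⟨⟨h0, hdn, _⟩, han, hnb, hsf⟩
        refine ⟨⟨han, hnb⟩, ?_, ?_⟩
        · rw [PySem.Int.toList_toStr, toChars_nonneg n h0]
          exact hdn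
        · rw [pred_iff n h0 hdn]
          exact hsf
    have hperm := (List.perm_ext_iff_of_nodup
      (hpl.imp (fun h => ne_of_lt h)) (hpr.imp (fun h => ne_of_lt h))).mpr hmem
    exact List.Perm.eq_of_pairwise (fun x y _ _ h1 h2 => absurd h2 (not_lt_of_gt h1)) hpl hpr hperm

-- ===== VERDICT (by name: the statement is the Claim_ definition above) =====
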